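-- pv_equiv track=rewrite | github.com/absn2/Armazem_De_Exercicios | Python/NPL HomeWork/split_sentence.py | word_tokenize
-- ===== SOURCE A (Python) =====
-- import string
--
-- def word_tokenize(sent):
--     sent = sent.lower()
--     final = ""
--     for i in sent:
--         if i not in string.punctuation:
--             final += i
--         else:
--             if i == "-":
--                 final += i
--     final = final.split()
--     return final
-- ===== SOURCE B (Python) =====
-- import string
--
-- def word_tokenize(sent):
--     # tokenize first, then clean each token; drop tokens that clean to ""
--     cleaned = ("".join(c for c in tok if c not in string.punctuation or c == "-")
--                for tok in sent.lower().split())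
--     return [w for w in cleaned if w]
-- ===== Notes on version B (the rewrite author's own statement) =====
-- stated objective: alternative
-- what changed: B reverses the decomposition: it lowercases and whitespace-splits first, then strips punctuation (keeping '-') from each token and drops tokens that clean to empty, instead of A's character-level clean of the whole string followed by split.
import Mathlib
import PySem

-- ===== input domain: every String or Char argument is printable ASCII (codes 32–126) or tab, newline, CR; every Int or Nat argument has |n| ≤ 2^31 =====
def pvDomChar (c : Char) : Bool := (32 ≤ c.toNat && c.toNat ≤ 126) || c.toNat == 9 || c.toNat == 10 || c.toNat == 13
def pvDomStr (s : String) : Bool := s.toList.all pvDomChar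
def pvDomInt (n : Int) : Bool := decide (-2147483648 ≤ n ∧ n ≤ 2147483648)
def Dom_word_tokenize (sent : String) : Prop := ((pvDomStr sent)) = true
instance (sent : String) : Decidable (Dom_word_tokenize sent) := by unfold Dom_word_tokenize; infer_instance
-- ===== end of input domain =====

-- B tokenizes first and then strips punctuation (keeping '-') from each token, dropping
-- tokens that become empty, instead of A's clean-the-whole-string-then-split; same values.


-- string.punctuation (shared constant of both Pythons)
def pvPunct : List Char :=
  ['!', '"', '#', '$', '%', '&', '\'', '(', ')', '*', '+', ',', '-', '.', '/', ':', ';', '<',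
   '=', '>', '?', '@', '[', '\\', ']', '^', '_', '`', '{', '|', '}', '~']

-- ===== PORT A =====
def word_tokenize (sent : String) : List String :=
  let s := PySem.Chars.lower sent.toList
  let final : List Char := s.foldl (fun acc c =>
    if pvPunct.contains c = false then acc ++ [c]
    else if c = '-' then acc ++ [c] else acc) []
  (PySem.Chars.split₀ final).map String.ofList

-- ===== PORT B =====
def word_tokenize_alt (sent : String) : List String :=
  let toks := PySem.Chars.split₀ (PySem.Chars.lower sent.toList)
  (((toks.map (fun w => w.filter (fun c => !pvPunct.contains c || c == '-'))).filter
      (fun w => !w.isEmpty)).map String.ofList)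

-- ===== PRECONDITION & SPEC =====
def Spec_word_tokenize (sent : String) (out : List String) : Prop := out = word_tokenize_alt sent
instance (sent : String) (out : List String) : Decidable (Spec_word_tokenize sent out) := by unfold Spec_word_tokenize; infer_instance

-- ===== CLAIM (what is proved, stated in full; the proofs are below) =====
def Claim_equal_word_tokenize : Prop := ∀ (sent : String), Dom_word_tokenize sent → Spec_word_tokenize sent (word_tokenize sent)

-- ===== LEMMAS AND PROOFS =====

def pvKeep (c : Char) : Bool := !pvPunct.contains c || c == '-'

lemma go_nil (cur : List Char) (acc : List (List Char)) :
    PySem.Chars.split₀.go [] cur acc =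
      if cur.isEmpty then acc.reverse else (cur.reverse :: acc).reverse := rfl

lemma go_cons (c : Char) (rest cur : List Char) (acc : List (List Char)) :
    PySem.Chars.split₀.go (c :: rest) cur acc =
      if PySem.Chars.isspace c then
        (if cur.isEmpty then PySem.Chars.split₀.go rest [] acc
         else PySem.Chars.split₀.go rest [] (cur.reverse :: acc))
      else PySem.Chars.split₀.go rest (c :: cur) acc := rfl

-- whitespace is never punctuation, so cleaning keeps every whitespace character
lemma pvKeep_of_isspace (c : Char) (h : PySem.Chars.isspace c = true) : pvKeep c = true := by
  unfold pvKeep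
  by_cases hc : pvPunct.contains c = true
  · simp only [pvPunct, List.contains_eq_mem, decide_eq_true_eq] at hc
    fin_cases hc <;> exact absurd h (by decide)
  · simp at hc; simp [hc]

lemma go_acc (cs : List Char) : ∀ (cur : List Char) (acc : List (List Char)),
    PySem.Chars.split₀.go cs cur acc = acc.reverse ++ PySem.Chars.split₀.go cs cur [] := by
  induction cs with
  | nil =>
    intro cur acc
    by_cases h : cur.isEmpty <;> simp [go_nil, h]
  | cons c rest ih =>
    intro cur acc
    by_cases hs : PySem.Chars.isspace c
    · rw [go_cons, if_pos hs]
      by_cases h : cur.isEmpty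
      · rw [if_pos h, ih [] acc, go_cons, if_pos hs, if_pos h]
      · rw [if_neg h, ih [] (cur.reverse :: acc), go_cons, if_pos hs, if_neg h,
            ih [] [cur.reverse]]
        simp
    · rw [go_cons, if_neg hs, ih (c :: cur) acc, go_cons, if_neg hs]

lemma go_filter (cs : List Char) : ∀ (cur : List Char) (acc : List (List Char)),
    PySem.Chars.split₀.go (cs.filter pvKeep) (cur.filter pvKeep) acc =
      acc.reverse ++
        ((PySem.Chars.split₀.go cs cur []).map (fun w => w.filter pvKeep)).filter
          (fun w => !w.isEmpty) := by
  induction cs with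
  | nil =>
    intro cur acc
    by_cases h : cur.isEmpty
    · have : cur = [] := List.isEmpty_iff.mp h
      subst this; simp [go_nil]
    · by_cases hf : (cur.filter pvKeep).isEmpty
      · simp [go_nil, h, List.filter_reverse, List.isEmpty_iff.mp hf]
      · simp [go_nil, h, hf, List.filter_reverse]
  | cons c rest ih =>
    intro cur acc
    by_cases hs : PySem.Chars.isspace c
    · have hk : pvKeep c = true := pvKeep_of_isspace c hs
      have ihe := ih [] acc
      simp only [List.filter_nil] at ihe
      by_cases h : cur.isEmpty
      · have : cur = [] := List.isEmpty_iff.mp h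
        subst this
        simpa [go_cons, hs, hk] using ihe
      · rw [show ((c :: rest).filter pvKeep) = c :: rest.filter pvKeep by simp [hk]]
        rw [go_cons, if_pos hs, go_cons, if_pos hs, if_neg h]
        rw [go_acc rest [] [cur.reverse]]
        by_cases hf : (cur.filter pvKeep).isEmpty
        · rw [if_pos hf, ihe]
          simp [List.filter_reverse, List.isEmpty_iff.mp hf]
        · have ihe2 := ih [] ((cur.filter pvKeep).reverse :: acc)
          simp only [List.filter_nil] at ihe2
          rw [if_neg hf, ihe2]
          simp [List.filter_reverse, List.isEmpty_iff.not.mp hf]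
    · rw [go_cons, if_neg hs]
      by_cases hk : pvKeep c = true
      · rw [show ((c :: rest).filter pvKeep) = c :: rest.filter pvKeep by simp [hk]]
        rw [go_cons, if_neg hs]
        have := ih (c :: cur) acc
        simpa [hk] using this
      · rw [show ((c :: rest).filter pvKeep) = rest.filter pvKeep by
            simp [hk]]
        have := ih (c :: cur) acc
        simpa [List.filter_cons, hk] using this

lemma foldl_step_eq_filter (cs : List Char) :
    cs.foldl (fun acc c =>
      if pvPunct.contains c = false then acc ++ [c]
      else if c = '-' then acc ++ [c] else acc) [] = cs.filter pvKeep := by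
  have hstep : (fun (acc : List Char) (c : Char) =>
      if pvPunct.contains c = false then acc ++ [c]
      else if c = '-' then acc ++ [c] else acc) =
      (fun acc c => if pvKeep c = true then acc ++ [c] else acc) := by
    funext acc c
    by_cases hc : c ∈ pvPunct
    · by_cases hd : c = '-' <;> simp [pvKeep, List.contains_eq_mem, hc, hd]
    · simp [pvKeep, List.contains_eq_mem, hc]
  rw [hstep]
  simpa using PySem.List.foldl_append_if pvKeep id cs []

-- ===== VERDICT (by name: the statement is the Claim_ definition above) =====
theorem word_tokenize_spec : Claim_equal_word_tokenize := by
  intro sent _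
  unfold Spec_word_tokenize word_tokenize word_tokenize_alt
  simp only [foldl_step_eq_filter]
  unfold PySem.Chars.split₀
  have h := go_filter (PySem.Chars.lower sent.toList) [] []
  simp only [List.filter_nil] at h
  rw [h]
  have hp : pvKeep = fun c => !decide (c ∈ pvPunct) || c == '-' := by
    funext c; simp [pvKeep, List.contains_eq_mem]
  rw [hp]
  simp
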